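-- pv_equiv track=rewrite | github.com/pavas23/Natural-Language-Processing | OpenIE/helper.py | is_non_contiguous
-- ===== SOURCE A (Python) =====
-- def is_non_contiguous(pos_tags):
--     """ Check if POS tags for relation are non-contiguous (e.g., interrupted by punctuation or conjunctions) """
--     gap_found = False
--     for i, (token, pos) in enumerate(pos_tags):
--         if pos == 'PUNCT' or pos == 'CCONJ':  # Punctuation or conjunctions indicate a gap
--             gap_found = True
--         if gap_found and pos == 'VERB':  # If a verb appears after the gap, relation is split
--             return True
--     return False
-- ===== SOURCE B (Python) =====
-- def is_non_contiguous(pos_tags):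
--     """ Check if POS tags for relation are non-contiguous (e.g., interrupted by punctuation or conjunctions) """
--     gap_idxs = [i for i, (_, pos) in enumerate(pos_tags) if pos in ('PUNCT', 'CCONJ')]
--     verb_idxs = [i for i, (_, pos) in enumerate(pos_tags) if pos == 'VERB']
--     return bool(gap_idxs) and bool(verb_idxs) and gap_idxs[0] < verb_idxs[-1]
-- ===== Notes on version B (the rewrite author's own statement) =====
-- stated objective: alternative
-- what changed: Replaces A's fused single scan with a mutating gap_found flag and early return by an index computation: build the lists of gap-token indices and verb indices via enumerate, then answer by comparing the first gap index with the last verb index.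
import Mathlib
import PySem

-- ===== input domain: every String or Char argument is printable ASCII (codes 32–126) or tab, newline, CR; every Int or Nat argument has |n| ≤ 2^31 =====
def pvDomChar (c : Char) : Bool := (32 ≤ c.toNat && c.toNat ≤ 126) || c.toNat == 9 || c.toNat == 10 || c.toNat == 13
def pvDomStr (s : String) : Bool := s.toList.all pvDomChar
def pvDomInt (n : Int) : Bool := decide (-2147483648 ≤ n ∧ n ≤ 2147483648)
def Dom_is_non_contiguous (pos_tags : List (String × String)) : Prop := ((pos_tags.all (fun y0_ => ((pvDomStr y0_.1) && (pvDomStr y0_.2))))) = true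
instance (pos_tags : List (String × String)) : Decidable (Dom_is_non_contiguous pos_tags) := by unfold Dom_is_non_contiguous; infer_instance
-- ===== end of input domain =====

-- B replaces A's fused flag-driven scan by an index computation: collect the indices of gap
-- tokens and of verbs, then compare the first gap index with the last verb index; objective: simpler.

-- ===== PORT A =====
-- the for-loop over pos_tags carrying the gap_found flag; early return becomes returning true
def isncA_loop : List (String × String) → Bool → Bool
  | [], _ => false
  | (_, pos) :: rest, gap_found =>
    let gap_found := if pos == "PUNCT" || pos == "CCONJ" then true else gap_found
    if gap_found && pos == "VERB" then true else isncA_loop rest gap_found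

def is_non_contiguous (pos_tags : List (String × String)) : Bool :=
  isncA_loop pos_tags false

-- ===== PORT B =====
def is_non_contiguous_alt (pos_tags : List (String × String)) : Bool :=
  let gap_idxs : List Int := (PySem.List.enumerate pos_tags 0).filterMap
    (fun ip => if ip.2.2 == "PUNCT" || ip.2.2 == "CCONJ" then some ip.1 else none)
  let verb_idxs : List Int := (PySem.List.enumerate pos_tags 0).filterMap
    (fun ip => if ip.2.2 == "VERB" then some ip.1 else none)
  !gap_idxs.isEmpty && !verb_idxs.isEmpty && decide (gap_idxs.head! < verb_idxs.getLast!)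

-- ===== PRECONDITION & SPEC =====
def Spec_is_non_contiguous (pos_tags : List (String × String)) (out : Bool) : Prop := out = is_non_contiguous_alt pos_tags
instance (pos_tags : List (String × String)) (out : Bool) : Decidable (Spec_is_non_contiguous pos_tags out) := by unfold Spec_is_non_contiguous; infer_instance

-- ===== CLAIM (what is proved, stated in full; the proofs are below) =====
def Claim_equal_is_non_contiguous : Prop := ∀ (pos_tags : List (String × String)), Dom_is_non_contiguous pos_tags → Spec_is_non_contiguous pos_tags (is_non_contiguous pos_tags)

-- ===== LEMMAS AND PROOFS =====

-- the two index lists of B, generalised to an arbitrary start offset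
def gIdx (k : Int) (l : List (String × String)) : List Int :=
  (PySem.List.enumerate l k).filterMap
    (fun ip => if ip.2.2 == "PUNCT" || ip.2.2 == "CCONJ" then some ip.1 else none)

def vIdx (k : Int) (l : List (String × String)) : List Int :=
  (PySem.List.enumerate l k).filterMap
    (fun ip => if ip.2.2 == "VERB" then some ip.1 else none)

theorem last_singleton (a : Int) : ([a] : List Int).getLast! = a := by
  simp [List.getLast!]

theorem last_cons (a : Int) (l : List Int) (h : l ≠ []) :
    (a :: l).getLast! = l.getLast! := by
  cases l with
  | nil => simp at h
  | cons b t => simp [List.getLast!]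

theorem head!_mem_int (l : List Int) (h : l ≠ []) : l.head! ∈ l := by
  cases l with
  | nil => simp at h
  | cons a t => simp [List.head!]

theorem last!_mem_int (l : List Int) (h : l ≠ []) : l.getLast! ∈ l := by
  induction l with
  | nil => simp at h
  | cons a t ih =>
    cases t with
    | nil => simp [last_singleton]
    | cons b u =>
      rw [last_cons a (b :: u) (by simp)]
      exact List.mem_cons_of_mem a (ih (by simp))

theorem gIdx_cons (k : Int) (t pos : String) (tl : List (String × String)) :
    gIdx k ((t, pos) :: tl) =
      (if pos == "PUNCT" || pos == "CCONJ" then [k] else []) ++ gIdx (k + 1) tl := by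
  by_cases h : (pos == "PUNCT" || pos == "CCONJ") = true <;>
    simp_all [gIdx, PySem.List.enumerate_cons]

theorem vIdx_cons (k : Int) (t pos : String) (tl : List (String × String)) :
    vIdx k ((t, pos) :: tl) =
      (if pos == "VERB" then [k] else []) ++ vIdx (k + 1) tl := by
  by_cases h : (pos == "VERB") = true <;>
    simp_all [vIdx, PySem.List.enumerate_cons]

theorem mem_vIdx_ge (k : Int) (l : List (String × String)) (x : Int) (hx : x ∈ vIdx k l) :
    k ≤ x := by
  induction l generalizing k with
  | nil => simp [vIdx] at hx
  | cons hd tl ih =>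
    obtain ⟨t, pos⟩ := hd
    rw [vIdx_cons] at hx
    rcases List.mem_append.mp hx with h | h
    · split at h <;> simp_all
    · have := ih (k + 1) h; omega

theorem mem_gIdx_ge (k : Int) (l : List (String × String)) (x : Int) (hx : x ∈ gIdx k l) :
    k ≤ x := by
  induction l generalizing k with
  | nil => simp [gIdx] at hx
  | cons hd tl ih =>
    obtain ⟨t, pos⟩ := hd
    rw [gIdx_cons] at hx
    rcases List.mem_append.mp hx with h | h
    · split at h <;> simp_all
    · have := ih (k + 1) h; omega

-- vIdx is empty exactly when there is no verb
theorem vIdx_isEmpty (k : Int) (l : List (String × String)) :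
    (vIdx k l).isEmpty = !(l.any (fun tp => tp.2 == "VERB")) := by
  induction l generalizing k with
  | nil => simp [vIdx]
  | cons hd tl ih =>
    obtain ⟨t, pos⟩ := hd
    rw [vIdx_cons]
    by_cases h : (pos == "VERB") = true <;> simp [h, ih (k + 1)]

-- once the flag is set, A's loop just scans the rest for a VERB
theorem isncA_loop_true (l : List (String × String)) :
    isncA_loop l true = l.any (fun tp => tp.2 == "VERB") := by
  induction l with
  | nil => rfl
  | cons hd tl ih =>
    obtain ⟨t, pos⟩ := hd
    simp only [isncA_loop, List.any_cons]
    by_cases h : (pos == "VERB") = true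
    · simp [h]
    · simp only [Bool.not_eq_true] at h
      split <;> simp_all

-- main invariant: A's loop from a clean flag equals B's index comparison at any offset
theorem isnc_main (l : List (String × String)) (k : Int) :
    isncA_loop l false =
      (!(gIdx k l).isEmpty && !(vIdx k l).isEmpty &&
        decide ((gIdx k l).head! < (vIdx k l).getLast!)) := by
  induction l generalizing k with
  | nil => simp [gIdx, vIdx, isncA_loop]
  | cons hd tl ih =>
    obtain ⟨t, pos⟩ := hd
    rw [gIdx_cons, vIdx_cons]
    by_cases hg : (pos == "PUNCT" || pos == "CCONJ") = true
    · -- head is a gap token (hence not a verb): A scans the tail for a verb;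
      -- B's first gap index is k, smaller than every tail verb index
      have hv : (pos == "VERB") = false := by
        rcases Bool.or_eq_true_iff.mp hg with h' | h' <;> simp_all
      simp only [isncA_loop, hg, if_true, Bool.true_and, hv, Bool.false_eq_true, if_false]
      rw [isncA_loop_true]
      simp only [hg, hv, if_true, Bool.false_eq_true, if_false, List.nil_append,
        List.singleton_append, List.isEmpty_cons, List.head!_cons, Bool.not_false,
        Bool.true_and]
      have he := vIdx_isEmpty (k + 1) tl
      cases hvi : vIdx (k + 1) tl with
      | nil =>
        rw [hvi] at he
        simp at he ⊢
        exact he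
      | cons a as =>
        have hany : tl.any (fun tp => tp.2 == "VERB") = true := by
          by_contra hfalse
          rw [hvi] at he
          simp_all
        have hge := mem_vIdx_ge (k + 1) tl _ (last!_mem_int (vIdx (k + 1) tl) (by rw [hvi]; simp))
        rw [hvi] at hge
        have hlt : k < (a :: as).getLast! := by omega
        simp only [hany, List.isEmpty_cons, Bool.not_false, Bool.true_and]
        exact (decide_eq_true hlt).symm
    · have hg' : (pos == "PUNCT" || pos == "CCONJ") = false := by simp_all
      simp only [isncA_loop, hg', Bool.false_eq_true, if_false, Bool.false_and,
        List.nil_append]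
      by_cases hv : (pos == "VERB") = true
      · -- head is a verb, flag still clear: B appends k in front of the verb indices
        simp only [hv, if_true, List.singleton_append]
        cases hvi : vIdx (k + 1) tl with
        | nil =>
          -- no verb in the tail: A is false, and B's last verb index k precedes every gap
          have hA : isncA_loop tl false = false := by
            rw [ih (k + 1), hvi]; simp
          rw [hA, last_singleton]
          cases hgi : gIdx (k + 1) tl with
          | nil => simp
          | cons b bs =>
            have hge := mem_gIdx_ge (k + 1) tl _
              (head!_mem_int (gIdx (k + 1) tl) (by rw [hgi]; simp))
            rw [hgi] at hge
            simp only [List.head!_cons] at hge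
            have hnb : ¬ (b < k) := by omega
            simp [hnb]
        | cons a as =>
          rw [last_cons k (a :: as) (by simp), ih (k + 1), hvi]
          simp
      · have hv' : (pos == "VERB") = false := by simp_all
        simp [hv', ih (k + 1)]

theorem isnc_eq (l : List (String × String)) :
    is_non_contiguous l = is_non_contiguous_alt l := by
  unfold is_non_contiguous is_non_contiguous_alt
  exact isnc_main l 0

-- ===== VERDICT (by name: the statement is the Claim_ definition above) =====
theorem is_non_contiguous_spec : Claim_equal_is_non_contiguous := by
  intro l _
  unfold Spec_is_non_contiguous
  exact isnc_eq l
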